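-- pv_equiv track=rewrite | github.com/alexbielen/allegro | allegro/constraints.py | unique_pitch_classes
-- ===== SOURCE A (Python) =====
-- from collections import Counter
-- from typing import Callable, List, Optional
--
-- def unique_pitch_classes(solution: List[int]) -> bool:
--     pitch_classes = Counter()
--     equal_temperament_mod = 12
--     for pitch_class in solution:
--         pitch_classes[str(pitch_class % equal_temperament_mod)] += 1
--
--     for _, count in pitch_classes.items():
--         if count != 1:
--             return False
--
--     return True
-- ===== SOURCE B (Python) =====
-- def unique_pitch_classes(solution):
--     # Pigeonhole: more than 12 pitches cannot all have distinct residues mod 12.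
--     if len(solution) > 12:
--         return False
--     return _all_distinct_mod12(solution)
--
--
-- def _all_distinct_mod12(pitches):
--     # Two pitches share a pitch class iff their difference is divisible by 12.
--     if not pitches:
--         return True
--     head = pitches[0]
--     rest = pitches[1:]
--     for other in rest:
--         if (head - other) % 12 == 0:
--             return False
--     return _all_distinct_mod12(rest)
-- ===== Notes on version B (the rewrite author's own statement) =====
-- stated objective: alternative
-- what changed: Replaces the Counter of str(p % 12) keys plus a second pass over the counts with a pigeonhole cutoff (more than 12 pitches can never be unique mod 12) followed by a recursive pairwise check that no difference of two pitches is divisible by 12 - no hash table, no residue values stored at all.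
import Mathlib
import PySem

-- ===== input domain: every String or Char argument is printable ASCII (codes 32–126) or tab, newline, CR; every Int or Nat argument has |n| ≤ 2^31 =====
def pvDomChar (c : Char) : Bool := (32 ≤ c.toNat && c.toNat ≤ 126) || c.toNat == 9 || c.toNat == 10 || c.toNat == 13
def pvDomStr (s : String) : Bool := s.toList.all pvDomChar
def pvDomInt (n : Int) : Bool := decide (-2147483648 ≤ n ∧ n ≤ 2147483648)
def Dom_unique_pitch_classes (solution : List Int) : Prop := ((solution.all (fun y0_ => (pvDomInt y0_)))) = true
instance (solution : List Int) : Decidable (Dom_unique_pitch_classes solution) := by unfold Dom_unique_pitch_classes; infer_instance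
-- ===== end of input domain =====

-- B is an alternative algorithm: a pigeonhole cutoff (len > 12 ⇒ False) plus a recursive
-- pairwise divisibility check (12 ∣ p - q), instead of A's Counter keyed by str(p % 12)
-- followed by a second pass over the counts.

-- ===== PORT A =====
-- second loop of A: scan the counter's items, return False at the first count ≠ 1
def pvCheckCounts : List (String × Int) → Bool
  | [] => true
  | (_, count) :: rest => if count ≠ 1 then false else pvCheckCounts rest

def unique_pitch_classes (solution : List Int) : Bool :=
  let pitch_classes :=
    solution.foldl
      (fun d pitch_class =>
        d.modify (PySem.Int.toStr (PySem.Int.mod pitch_class 12)) 0 (· + 1))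
      PySem.Dict.empty
  pvCheckCounts pitch_classes.items

-- ===== PORT B =====
-- the for-loop of _all_distinct_mod12: True at the first `other` with (head - other) % 12 == 0
def pvClash (head : Int) : List Int → Bool
  | [] => false
  | other :: rest =>
      if PySem.Int.mod (head - other) 12 = 0 then true else pvClash head rest

-- _all_distinct_mod12
def pvAllDistinctMod12 : List Int → Bool
  | [] => true
  | head :: rest => if pvClash head rest then false else pvAllDistinctMod12 rest

def unique_pitch_classes_alt (solution : List Int) : Bool :=
  if 12 < PySem.List.len solution then false
  else pvAllDistinctMod12 solution

-- ===== PRECONDITION & SPEC =====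
def Spec_unique_pitch_classes (solution : List Int) (out : Bool) : Prop := out = unique_pitch_classes_alt solution
instance (solution : List Int) (out : Bool) : Decidable (Spec_unique_pitch_classes solution out) := by unfold Spec_unique_pitch_classes; infer_instance

-- ===== CLAIM (what is proved, stated in full; the proofs are below) =====
def Claim_equal_unique_pitch_classes : Prop := ∀ (solution : List Int), Dom_unique_pitch_classes solution → Spec_unique_pitch_classes solution (unique_pitch_classes solution)

-- ===== LEMMAS AND PROOFS =====

-- the residue A keys its counter by
def pvRes (p : Int) : Int := PySem.Int.mod p 12

lemma pvRes_mem_range (p : Int) : 0 ≤ pvRes p ∧ pvRes p < 12 :=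
  ⟨PySem.Int.mod_nonneg p (by norm_num), PySem.Int.mod_lt p (by norm_num)⟩

-- str is injective on the 12 possible residues
lemma pvToStr_inj_res (a b : Int) (h : PySem.Int.toStr (pvRes a) = PySem.Int.toStr (pvRes b)) :
    pvRes a = pvRes b := by
  obtain ⟨ha0, ha1⟩ := pvRes_mem_range a
  obtain ⟨hb0, hb1⟩ := pvRes_mem_range b
  interval_cases h1 : (pvRes a) <;> interval_cases h2 : (pvRes b) <;>
    simp_all [PySem.Int.toStr] <;> exact absurd h (by decide)

lemma pvCheckCounts_eq_true_iff (l : List (String × Int)) :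
    pvCheckCounts l = true ↔ ∀ kv ∈ l, kv.2 = 1 := by
  induction l with
  | nil => simp [pvCheckCounts]
  | cons kv rest ih =>
      obtain ⟨k, c⟩ := kv
      by_cases hc : c = 1 <;> simp [pvCheckCounts, hc, ih]

-- A's boolean characterised: the residue-string list has no duplicates
lemma portA_iff (solution : List Int) :
    unique_pitch_classes solution = true ↔
      (solution.map (fun p => PySem.Int.toStr (pvRes p))).Nodup := by
  have hA : unique_pitch_classes solution =
      pvCheckCounts (PySem.Dict.counter
        (solution.map (fun p => PySem.Int.toStr (pvRes p)))).items := by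
    unfold unique_pitch_classes
    rw [PySem.Dict.counter_eq_foldl, List.foldl_map]
    rfl
  rw [hA, pvCheckCounts_eq_true_iff, PySem.Dict.items_counter]
  set ks := solution.map (fun p => PySem.Int.toStr (pvRes p)) with hks
  constructor
  · intro h
    rw [List.nodup_iff_count_le_one]
    intro k
    by_cases hk : k ∈ ks
    · have := h (k, (ks.count k : Int)) (by
        simp only [List.mem_map]
        exact ⟨k, by simpa [PySem.Set.mem_ofList] using hk, rfl⟩)
      simp at this
      omega
    · simp [List.count_eq_zero_of_not_mem hk]
  · intro hnd kv hkv
    simp only [List.mem_map] at hkv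
    obtain ⟨k, hk, rfl⟩ := hkv
    have hk' : k ∈ ks := by simpa [PySem.Set.mem_ofList] using hk
    have h1 : ks.count k ≤ 1 := (List.nodup_iff_count_le_one.mp hnd) k
    have h2 : 1 ≤ ks.count k := List.count_pos_iff.mpr hk'
    simp
    omega

-- the two Nodup conditions agree (str injective on residues)
lemma nodup_str_iff (solution : List Int) :
    (solution.map (fun p => PySem.Int.toStr (pvRes p))).Nodup ↔
      (solution.map pvRes).Nodup := by
  simp only [List.Nodup, List.pairwise_map]
  constructor <;> intro h <;> refine h.imp ?_
  · intro a b hab he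
    exact hab (he ▸ rfl)
  · intro a b hab he
    exact hab (pvToStr_inj_res a b he)

-- B's clash test is exactly residue equality
lemma pvClash_iff (head : Int) (l : List Int) :
    pvClash head l = true ↔ ∃ o ∈ l, pvRes head = pvRes o := by
  induction l with
  | nil => simp [pvClash]
  | cons o rest ih =>
      have hkey : (PySem.Int.mod (head - o) 12 = 0) ↔ (pvRes head = pvRes o) := by
        rw [PySem.Int.mod_eq_zero_iff_dvd]
        unfold pvRes
        rw [PySem.Int.mod_eq_emod_of_pos (by norm_num : (0:Int) < 12),
            PySem.Int.mod_eq_emod_of_pos (by norm_num : (0:Int) < 12)]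
        omega
      by_cases h : PySem.Int.mod (head - o) 12 = 0
      · simp only [pvClash, if_pos h, true_iff]
        exact ⟨o, List.mem_cons_self, hkey.mp h⟩
      · simp only [pvClash, if_neg h, ih, List.mem_cons]
        constructor
        · rintro ⟨q, hq, he⟩; exact ⟨q, Or.inr hq, he⟩
        · rintro ⟨q, hq | hq, he⟩
          · subst hq; exact absurd (hkey.mpr he) h
          · exact ⟨q, hq, he⟩

-- B's recursion characterised: the residue list has no duplicates
lemma pvAllDistinct_iff (l : List Int) :
    pvAllDistinctMod12 l = true ↔ (l.map pvRes).Nodup := by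
  induction l with
  | nil => simp [pvAllDistinctMod12]
  | cons head rest ih =>
      simp only [List.map_cons, List.nodup_cons, List.mem_map]
      cases hc : pvClash head rest with
      | true =>
          obtain ⟨o, ho, he⟩ := (pvClash_iff head rest).mp hc
          simp only [pvAllDistinctMod12, hc, if_true]
          simp only [Bool.false_eq_true, false_iff, not_and]
          intro hne
          exact absurd ⟨o, ho, he.symm⟩ hne
      | false =>
          have hnc : ¬ (∃ x ∈ rest, pvRes x = pvRes head) := by
            rintro ⟨x, hx, he⟩
            have : pvClash head rest = true :=
              (pvClash_iff head rest).mpr ⟨x, hx, he.symm⟩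
            simp [hc] at this
          simp only [pvAllDistinctMod12, hc, Bool.false_eq_true, if_false, ih]
          exact ⟨fun hnd => ⟨hnc, hnd⟩, fun ⟨_, hnd⟩ => hnd⟩

-- pigeonhole: more than 12 elements cannot have pairwise distinct residues
lemma nodup_res_length_le (l : List Int) (hnd : (l.map pvRes).Nodup) : l.length ≤ 12 := by
  have hsub : (l.map pvRes).toFinset ⊆ Finset.Ico (0 : Int) 12 := by
    intro x hx
    rw [List.mem_toFinset, List.mem_map] at hx
    obtain ⟨p, _, rfl⟩ := hx
    obtain ⟨h0, h1⟩ := pvRes_mem_range p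
    exact Finset.mem_Ico.mpr ⟨h0, h1⟩
  have hcard := Finset.card_le_card hsub
  rw [List.toFinset_card_of_nodup hnd, List.length_map] at hcard
  simpa using hcard

-- ===== VERDICT (by name: the statement is the Claim_ definition above) =====
theorem unique_pitch_classes_spec : Claim_equal_unique_pitch_classes := by
  intro solution _
  unfold Spec_unique_pitch_classes unique_pitch_classes_alt
  by_cases hlen : 12 < PySem.List.len solution
  · rw [if_pos hlen]
    by_contra h
    have hA : unique_pitch_classes solution = true := by
      cases hAe : unique_pitch_classes solution
      · exact absurd hAe h
      · rfl
    have := nodup_res_length_le solution ((nodup_str_iff solution).mp ((portA_iff solution).mp hA))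
    rw [PySem.List.len_eq] at hlen
    omega
  · rw [if_neg hlen, Bool.eq_iff_iff, portA_iff, nodup_str_iff, pvAllDistinct_iff]
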